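-- pv_equiv track=rewrite | github.com/llucid-97/betweenle_solver | betweenle_solver/solver.py | find_closest_word
-- ===== SOURCE A (Python) =====
-- import typing as T
--
-- def find_closest_word(sorted_words, candidate, boundary:T.Literal['both','after','before']='both'):
--     """
--     Find the alphabetically closest word to the candidate word in the sorted list.
--
--     :param sorted_words: A sorted list of words
--     :param candidate: The word to find the closest match for
--     :param boundary: 'before', 'after', or 'both' (default)
--     :return: The closest word based on the boundary condition
--     """
--     if boundary not in ['before', 'after', 'both']:
--         raise ValueError("boundary must be 'before', 'after', or 'both'")
--
--     # Binary search to find insertion point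
--     left, right = 0, len(sorted_words) - 1
--     while left <= right:
--         mid = (left + right) // 2
--         if sorted_words[mid] < candidate:
--             left = mid + 1
--         elif sorted_words[mid] > candidate:
--             right = mid - 1
--         else:
--             return sorted_words[mid]  # Exact match found
--
--     # Handle boundary conditions
--     if boundary == 'before':
--         return sorted_words[right] if right >= 0 else None
--     elif boundary == 'after':
--         return sorted_words[left] if left < len(sorted_words) else None
--
--     # For 'both', compare words at insertion point and before
--     before = sorted_words[right] if right >= 0 else None
--     after = sorted_words[left] if left < len(sorted_words) else None
--
--     if before is None:
--         return after
--     if after is None: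
--         return before
--
--     # Compare distances
--     before_distance = abs(ord(before[0]) - ord(candidate[0]))
--     after_distance = abs(ord(after[0]) - ord(candidate[0]))
--
--     if before_distance < after_distance:
--         return before
--     elif after_distance < before_distance:
--         return after
--     else:
--         # If first letters are equidistant, compare entire words
--         return before if before < candidate else after
-- ===== SOURCE B (Python) =====
-- def _pick(before, after, candidate, boundary):
--     if boundary == 'before':
--         return before
--     if boundary == 'after':
--         return after
--     if before is None:
--         return after
--     if after is None:
--         return before
--     bd = abs(ord(before[0]) - ord(candidate[0]))
--     ad = abs(ord(after[0]) - ord(candidate[0]))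
--     if bd != ad:
--         return before if bd < ad else after
--     return before if before < candidate else after
--
--
-- def find_closest_word(sorted_words, candidate, boundary='both'):
--     if boundary not in ('before', 'after', 'both'):
--         raise ValueError("boundary must be 'before', 'after', or 'both'")
--     # single linear pass: stop at the first word >= candidate
--     i = 0
--     for w in sorted_words:
--         if w == candidate:
--             return w
--         if w > candidate:
--             break
--         i += 1
--     before = sorted_words[i - 1] if i > 0 else None
--     after = sorted_words[i] if i < len(sorted_words) else None
--     return _pick(before, after, candidate, boundary)
-- ===== Notes on version B (the rewrite author's own statement) =====
-- stated objective: simpler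
-- what changed: Replaces A's binary search over (left,right) index arithmetic with a single early-exit linear scan for the first word >= candidate, and factors the boundary handling into a helper applied to the two neighbours of that insertion point.
-- outside the precondition, e.g. on find_closest_word(['c', 'a', 'b'], 'b', 'both'): A returns 'b', B returns 'c'
import Mathlib
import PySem

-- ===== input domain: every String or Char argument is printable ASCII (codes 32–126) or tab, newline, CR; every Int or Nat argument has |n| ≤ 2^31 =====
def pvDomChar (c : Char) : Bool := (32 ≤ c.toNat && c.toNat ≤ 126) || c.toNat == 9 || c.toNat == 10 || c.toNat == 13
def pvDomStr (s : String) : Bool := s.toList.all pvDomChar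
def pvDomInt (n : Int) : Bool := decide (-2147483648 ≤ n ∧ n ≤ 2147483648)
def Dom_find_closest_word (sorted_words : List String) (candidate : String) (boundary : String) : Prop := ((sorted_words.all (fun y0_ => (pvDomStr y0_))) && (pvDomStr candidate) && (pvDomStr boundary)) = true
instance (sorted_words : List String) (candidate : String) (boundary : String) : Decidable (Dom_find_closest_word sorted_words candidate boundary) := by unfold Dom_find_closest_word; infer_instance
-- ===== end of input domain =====

-- B replaces A's binary search by a single early-exit linear scan for the first word ≥ candidate
-- (simpler; not faster); the boundary handling is factored into a helper. Return values only (no mutation).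

-- ===== PORT A =====
-- ord(s[0]) as both Pythons compute it; the s = "" IndexError case is excluded by Pre_ ("" never reaches it there).
def ord0 (s : String) : Int :=
  match PySem.Str.pyGet? s 0 with
  | some c => (c.toNat : Int)
  | none => 0

-- the 'while left <= right' binary-search loop; state (left, right); inl = early exact-match return
def fcwLoop (sorted_words : List String) (candidate : String) (left right : Int) :
    String ⊕ (Int × Int) :=
  if _h : left ≤ right then
    let mid := PySem.Int.floordiv (left + right) 2
    -- every index A probes is in range (0 ≤ left ≤ mid ≤ right < len)
    if PySem.List.pyGetD sorted_words mid "" < candidate then fcwLoop sorted_words candidate (mid + 1) right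
    else if candidate < PySem.List.pyGetD sorted_words mid "" then fcwLoop sorted_words candidate left (mid - 1)
    else Sum.inl (PySem.List.pyGetD sorted_words mid "")
  else Sum.inr (left, right)
termination_by (right + 1 - left).toNat
decreasing_by
  · have hb := PySem.Int.floordiv_two_mid_bounds _h
    omega
  · have hb := PySem.Int.floordiv_two_mid_bounds _h
    omega

def find_closest_word (sorted_words : List String) (candidate : String) (boundary : String) : Option String :=
  if boundary ≠ "before" ∧ boundary ≠ "after" ∧ boundary ≠ "both" then
    none   -- raise ValueError: outside Pre_
  else
    match fcwLoop sorted_words candidate 0 ((sorted_words.length : Int) - 1) with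
    | Sum.inl w => some w   -- exact match found
    | Sum.inr (left, right) =>
      if boundary = "before" then
        if 0 ≤ right then some (PySem.List.pyGetD sorted_words right "") else none
      else if boundary = "after" then
        if left < (sorted_words.length : Int) then some (PySem.List.pyGetD sorted_words left "") else none
      else
        let before := if 0 ≤ right then some (PySem.List.pyGetD sorted_words right "") else none
        let after := if left < (sorted_words.length : Int) then some (PySem.List.pyGetD sorted_words left "") else none
        match before, after with
        | none, a => a
        | some b, none => some b
        | some b, some a =>
          let before_distance := |ord0 b - ord0 candidate|
          let after_distance := |ord0 a - ord0 candidate|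
          if before_distance < after_distance then some b
          else if after_distance < before_distance then some a
          else if b < candidate then some b else some a

-- ===== PORT B =====
-- Source B's _pick: the boundary handling applied to the two neighbours of the insertion point
def pickClosest (before after : Option String) (candidate boundary : String) : Option String :=
  if boundary = "before" then before
  else if boundary = "after" then after
  else
    match before, after with
    | none, a => a
    | some b, none => some b
    | some b, some a =>
      let bd := |ord0 b - ord0 candidate|
      let ad := |ord0 a - ord0 candidate|
      if bd ≠ ad then (if bd < ad then some b else some a)
      else (if b < candidate then some b else some a)

-- Source B's for-loop: early-exit scan counting words < candidate; inl = exact match returned from the loop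
def scanGE (words : List String) (candidate : String) (i : Nat) : String ⊕ Nat :=
  match words with
  | [] => Sum.inr i
  | w :: rest =>
    if w = candidate then Sum.inl w
    else if candidate < w then Sum.inr i
    else scanGE rest candidate (i + 1)

def find_closest_word_alt (sorted_words : List String) (candidate : String) (boundary : String) : Option String :=
  if boundary ≠ "before" ∧ boundary ≠ "after" ∧ boundary ≠ "both" then
    none   -- raise ValueError: outside Pre_
  else
    match scanGE sorted_words candidate 0 with
    | Sum.inl w => some w
    | Sum.inr i =>
      let before := if 0 < i then sorted_words[i - 1]? else none
      let after := sorted_words[i]?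
      pickClosest before after candidate boundary

-- ===== PRECONDITION & SPEC =====
-- Pre_ excludes invalid boundary strings (A raises ValueError), unsorted lists of length > 2 on which
-- the candidate does not compare the same way with every word (the value of A's binary search there is
-- an accident of its probe order; on lists of length ≤ 2, and whenever the candidate is strictly below
-- or strictly above every word, the two programs provably agree whatever the order), and the sorted
-- inputs where A raises IndexError on ord(before[0]): boundary 'both', candidate absent, some word
-- above it and only "" below it.
def Pre_find_closest_word (sorted_words : List String) (candidate : String) (boundary : String) : Prop :=
  (boundary = "before" ∨ boundary = "after" ∨ boundary = "both") ∧
  (List.Pairwise (fun a b => a.toList ≤ b.toList) sorted_words ∨ sorted_words.length ≤ 2 ∨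
    (∀ w ∈ sorted_words, w.toList < candidate.toList) ∨
    (∀ w ∈ sorted_words, candidate.toList < w.toList)) ∧
  ¬ (List.Pairwise (fun a b => a.toList ≤ b.toList) sorted_words ∧ boundary = "both" ∧
      "" ∈ sorted_words ∧ candidate ∉ sorted_words ∧
      (∃ w ∈ sorted_words, candidate.toList < w.toList) ∧
      (∀ w ∈ sorted_words, w.toList < candidate.toList → w = ""))
instance (sorted_words : List String) (candidate : String) (boundary : String) : Decidable (Pre_find_closest_word sorted_words candidate boundary) := by unfold Pre_find_closest_word; infer_instance

def pvWitness_find_closest_word : List String × String × String := (["apple", "berry", "cherry"], "banana", "both")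

def Spec_find_closest_word (sorted_words : List String) (candidate : String) (boundary : String) (out : Option String) : Prop := out = find_closest_word_alt sorted_words candidate boundary
instance (sorted_words : List String) (candidate : String) (boundary : String) (out : Option String) : Decidable (Spec_find_closest_word sorted_words candidate boundary out) := by unfold Spec_find_closest_word; infer_instance

-- ===== CLAIM (what is proved, stated in full; the proofs are below) =====
def Claim_equal_find_closest_word : Prop := ∀ (sorted_words : List String) (candidate : String) (boundary : String), Dom_find_closest_word sorted_words candidate boundary → Pre_find_closest_word sorted_words candidate boundary → Spec_find_closest_word sorted_words candidate boundary (find_closest_word sorted_words candidate boundary)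

-- ===== LEMMAS AND PROOFS =====

-- first index with candidate ≤ word (= list length if none): the insertion point both searches compute
def lbIdx (ws : List String) (candidate : String) : Nat :=
  ws.findIdx (fun w => decide (candidate ≤ w))

theorem findIdx_eq_of_bounds {α : Type} (p : α → Bool) (xs : List α) (l : Nat)
    (hle : l ≤ xs.length)
    (hlt : ∀ (j : Nat) (hj : j < xs.length), j < l → p xs[j] = false)
    (hl : ∀ (hl : l < xs.length), p xs[l] = true) :
    xs.findIdx p = l := by
  rcases Nat.lt_or_ge (xs.findIdx p) l with h | h
  · have hflt : xs.findIdx p < xs.length := Nat.lt_of_lt_of_le h hle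
    have h1 := List.findIdx_getElem (w := hflt) (p := p) (xs := xs)
    have h2 := hlt _ hflt h
    exact absurd (h2.symm.trans h1) Bool.false_ne_true
  · rcases Nat.eq_or_lt_of_le h with h' | h'
    · omega
    · rcases Nat.lt_or_ge l xs.length with hl' | hl'
      · have h1 := List.not_of_lt_findIdx (p := p) (xs := xs) h'
        have h2 := hl hl'
        exact absurd (h2.symm.trans h1) (by decide : (true : Bool) ≠ false)
      · have := List.findIdx_le_length (p := p) (xs := xs)
        omega

theorem scanGE_spec (ws : List String) (candidate : String) (i : Nat)
    (hs : List.Pairwise (· ≤ ·) ws) :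
    scanGE ws candidate i =
      if candidate ∈ ws then Sum.inl candidate
      else Sum.inr (i + lbIdx ws candidate) := by
  induction ws generalizing i with
  | nil => simp [scanGE, lbIdx]
  | cons w rest ih =>
    rcases List.pairwise_cons.mp hs with ⟨hw, hrest⟩
    by_cases he : w = candidate
    · subst he
      rw [scanGE, if_pos rfl, if_pos (List.mem_cons_self)]
    · by_cases hlt : candidate < w
      · have hnm : candidate ∉ w :: rest := by
          intro hm
          rcases List.mem_cons.mp hm with h | h
          · exact he h.symm
          · exact absurd (lt_of_lt_of_le hlt (hw _ h)) (lt_irrefl _)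
        have hfi : lbIdx (w :: rest) candidate = 0 := by
          rw [lbIdx, List.findIdx_cons, decide_eq_true (le_of_lt hlt), cond_true]
        rw [scanGE, if_neg he, if_pos hlt, if_neg hnm, hfi, Nat.add_zero]
      · have hwlt : w < candidate := lt_of_le_of_ne (le_of_not_gt hlt) he
        have hnle : ¬ candidate ≤ w := not_le_of_gt hwlt
        have hfi : lbIdx (w :: rest) candidate = lbIdx rest candidate + 1 := by
          rw [lbIdx, List.findIdx_cons, decide_eq_false hnle, cond_false]
          rfl
        rw [scanGE, if_neg he, if_neg hlt, ih (i + 1) hrest]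
        by_cases hm : candidate ∈ rest
        · rw [if_pos hm, if_pos (List.mem_cons_of_mem _ hm)]
        · have hnm : candidate ∉ w :: rest := by
            intro h
            rcases List.mem_cons.mp h with h | h
            · exact he h.symm
            · exact hm h
          rw [if_neg hm, if_neg hnm, hfi]
          simp only [Sum.inr.injEq]
          omega

theorem fcwLoop_spec (ws : List String) (candidate : String)
    (hs : List.Pairwise (· ≤ ·) ws) :
    ∀ (N : Nat) (l r : Int), (r + 1 - l).toNat = N →
    0 ≤ l → l ≤ r + 1 → r < (ws.length : Int) →
    (∀ (j : Nat) (hj : j < ws.length), (j : Int) < l → ws[j] < candidate) →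
    (∀ (j : Nat) (hj : j < ws.length), r < (j : Int) → candidate < ws[j]) →
    fcwLoop ws candidate l r =
      if candidate ∈ ws then Sum.inl candidate
      else Sum.inr ((lbIdx ws candidate : Int), (lbIdx ws candidate : Int) - 1) := by
  intro N
  induction N using Nat.strong_induction_on with
  | _ N ih =>
    intro l r hN h0 hlr hrlen hleft hright
    by_cases h : l ≤ r
    · -- loop body runs
      have hb := PySem.Int.floordiv_two_mid_bounds h
      set mid := PySem.Int.floordiv (l + r) 2 with hmid
      have hmid0 : 0 ≤ mid := le_trans h0 hb.1
      have hmidlen : mid < (ws.length : Int) := lt_of_le_of_lt hb.2 hrlen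
      have hmidn : mid.toNat < ws.length := by omega
      have hget : PySem.List.pyGetD ws mid "" = ws[mid.toNat] := by
        rw [PySem.List.pyGetD_of_nonneg ws "" hmid0, List.getD_eq_getElem?_getD,
          List.getElem?_eq_getElem hmidn]
        rfl
      have hpair := List.pairwise_iff_getElem.mp hs
      rw [fcwLoop]
      simp only [dif_pos h, ← hmid, hget]
      by_cases hlt : ws[mid.toNat] < candidate
      · rw [if_pos hlt]
        refine ih (r + 1 - (mid + 1)).toNat (by omega) (mid + 1) r rfl (by omega) (by omega) hrlen ?_ hright
        intro j hj hjl
        rcases Nat.lt_or_ge j mid.toNat with hc | hc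
        · exact lt_of_le_of_lt (hpair j mid.toNat hj hmidn hc) hlt
        · have : j = mid.toNat := by omega
          subst this; exact hlt
      · rw [if_neg hlt]
        by_cases hgt : candidate < ws[mid.toNat]
        · rw [if_pos hgt]
          refine ih (mid - 1 + 1 - l).toNat (by omega) l (mid - 1) rfl h0 (by omega) (by omega) hleft ?_
          intro j hj hjr
          rcases Nat.lt_or_ge mid.toNat j with hc | hc
          · exact lt_of_lt_of_le hgt (hpair mid.toNat j hmidn hj hc)
          · have : j = mid.toNat := by omega
            subst this; exact hgt
        · rw [if_neg hgt]
          have heq : ws[mid.toNat] = candidate := le_antisymm (le_of_not_gt hgt) (le_of_not_gt hlt)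
          have hmem : candidate ∈ ws := heq ▸ List.getElem_mem hmidn
          rw [if_pos hmem, heq]
    · -- loop exits: l = r + 1
      have hlr' : l = r + 1 := by omega
      have hnm : candidate ∉ ws := by
        intro hm
        rcases List.getElem_of_mem hm with ⟨j, hj, hje⟩
        rcases Int.lt_or_le (j : Int) l with hc | hc
        · exact absurd hje (ne_of_gt (hleft j hj hc)).symm
        · exact absurd hje (ne_of_lt (hright j hj (by omega))).symm
      have hfi : lbIdx ws candidate = l.toNat := by
        apply findIdx_eq_of_bounds
        · omega
        · intro j hj hjl
          simp [not_le_of_gt (hleft j hj (by omega))]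
        · intro hl
          simp [le_of_lt (hright l.toNat hl (by omega))]
      rw [fcwLoop]
      simp only [dif_neg h]
      rw [if_neg hnm, hfi]
      have : ((l.toNat : Int)) = l := by omega
      rw [this, hlr']
      norm_num

-- the two before/after option values coincide at a common insertion point F ≤ len
theorem before_eq (ws : List String) (F : Nat) (hF : F ≤ ws.length) :
    (if 0 ≤ ((F : Int) - 1) then some (PySem.List.pyGetD ws ((F : Int) - 1) "") else none)
      = (if 0 < F then ws[F - 1]? else none) := by
  by_cases h : 0 < F
  · have hlt : F - 1 < ws.length := by omega
    rw [if_pos (by omega), if_pos h,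
      PySem.List.pyGetD_of_nonneg ws "" (by omega), List.getElem?_eq_getElem hlt]
    have : ((F : Int) - 1).toNat = F - 1 := by omega
    rw [this, List.getD_eq_getElem?_getD, List.getElem?_eq_getElem hlt]
    rfl
  · rw [if_neg (by omega), if_neg h]

theorem after_eq (ws : List String) (F : Nat) (_hF : F ≤ ws.length) :
    (if (F : Int) < (ws.length : Int) then some (PySem.List.pyGetD ws (F : Int) "") else none)
      = ws[F]? := by
  by_cases h : F < ws.length
  · rw [if_pos (by omega), PySem.List.pyGetD_of_nonneg ws "" (by omega),
      List.getElem?_eq_getElem h, Int.toNat_natCast, List.getD_eq_getElem?_getD,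
      List.getElem?_eq_getElem h]
    rfl
  · rw [if_neg (by omega), (List.getElem?_eq_none_iff).mpr (by omega)]

-- the common shape of the two search results: early exact match, or an insertion point F ≤ len
def SearchAgree (ws : List String) (candidate : String) : Prop :=
  (fcwLoop ws candidate 0 ((ws.length : Int) - 1) = Sum.inl candidate ∧
    scanGE ws candidate 0 = Sum.inl candidate) ∨
  (∃ i : Nat, i ≤ ws.length ∧
    fcwLoop ws candidate 0 ((ws.length : Int) - 1) = Sum.inr ((i : Int), (i : Int) - 1) ∧
    scanGE ws candidate 0 = Sum.inr i)

theorem search_agree_sorted (ws : List String) (candidate : String)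
    (hs : List.Pairwise (· ≤ ·) ws) : SearchAgree ws candidate := by
  have hloop := fcwLoop_spec ws candidate hs ((ws.length : Int) - 1 + 1 - 0).toNat 0
    ((ws.length : Int) - 1) rfl (by omega) (by omega) (by omega)
    (by intro j hj hjl; omega) (by intro j hj hjr; omega)
  have hscan := scanGE_spec ws candidate 0 hs
  by_cases hm : candidate ∈ ws
  · left
    rw [hloop, hscan, if_pos hm, if_pos hm]
    exact ⟨rfl, rfl⟩
  · right
    refine ⟨lbIdx ws candidate, List.findIdx_le_length, ?_, ?_⟩
    · rw [hloop, if_neg hm]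
    · rw [hscan, if_neg hm, Nat.zero_add]

-- on lists of length ≤ 2 the two searches agree whatever the element order
theorem search_agree_small (ws : List String) (candidate : String)
    (hlen : ws.length ≤ 2) : SearchAgree ws candidate := by
  unfold SearchAgree
  match ws with
  | [] =>
    right
    refine ⟨0, by simp, ?_, rfl⟩
    rw [fcwLoop]
    norm_num
  | [x] =>
    rw [show (([x] : List String).length : Int) - 1 = 0 by simp]
    by_cases he : x = candidate
    · left
      subst he
      constructor
      · rw [fcwLoop]
        simp only [dif_pos (by omega : (0:Int) ≤ 0)]
        rw [show PySem.Int.floordiv (0 + 0) 2 = 0 from rfl]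
        rw [show PySem.List.pyGetD [x] (0:Int) "" = x from rfl]
        rw [if_neg (lt_irrefl x), if_neg (lt_irrefl x)]
      · rw [scanGE, if_pos rfl]
    · rcases lt_or_gt_of_ne he with hlt | hgt
      · -- x < candidate : insertion point 1
        right
        refine ⟨1, by simp, ?_, ?_⟩
        · rw [fcwLoop]
          simp only [dif_pos (by omega : (0:Int) ≤ 0)]
          rw [show PySem.Int.floordiv (0 + 0) 2 = 0 from rfl]
          rw [show PySem.List.pyGetD [x] (0:Int) "" = x from rfl, if_pos hlt]
          rw [fcwLoop]
          norm_num
        · rw [scanGE, if_neg he, if_neg (not_lt_of_gt hlt), scanGE]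
      · -- candidate < x : insertion point 0
        right
        refine ⟨0, by simp, ?_, ?_⟩
        · rw [fcwLoop]
          simp only [dif_pos (by omega : (0:Int) ≤ 0)]
          rw [show PySem.Int.floordiv (0 + 0) 2 = 0 from rfl]
          rw [show PySem.List.pyGetD [x] (0:Int) "" = x from rfl,
            if_neg (not_lt_of_gt hgt), if_pos hgt]
          rw [fcwLoop]
          norm_num
        · rw [scanGE, if_neg he, if_pos hgt]
  | [x, y] =>
    rw [show (([x, y] : List String).length : Int) - 1 = 1 by simp]
    have hstep : fcwLoop [x, y] candidate 0 1 =
        (if x < candidate then fcwLoop [x, y] candidate 1 1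
         else if candidate < x then fcwLoop [x, y] candidate 0 (-1)
         else Sum.inl x) := by
      rw [fcwLoop]
      simp only [dif_pos (by omega : (0:Int) ≤ 1)]
      rw [show PySem.Int.floordiv (0 + 1) 2 = 0 from rfl]
      rw [show PySem.List.pyGetD [x, y] (0:Int) "" = x from rfl]
      norm_num
    by_cases hex : x = candidate
    · left
      subst hex
      rw [hstep, if_neg (lt_irrefl x), if_neg (lt_irrefl x), scanGE, if_pos rfl]
      exact ⟨rfl, rfl⟩
    · rcases lt_or_gt_of_ne hex with hx | hx
      · -- x < candidate : continue right
        have hstep2 : fcwLoop [x, y] candidate 1 1 =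
            (if y < candidate then fcwLoop [x, y] candidate 2 1
             else if candidate < y then fcwLoop [x, y] candidate 1 0
             else Sum.inl y) := by
          rw [fcwLoop]
          simp only [dif_pos (by omega : (1:Int) ≤ 1)]
          rw [show PySem.Int.floordiv (1 + 1) 2 = 1 from rfl]
          rw [show PySem.List.pyGetD [x, y] (1:Int) "" = y from rfl]
          norm_num
        by_cases hey : y = candidate
        · left
          subst hey
          rw [hstep, if_pos hx, hstep2, if_neg (lt_irrefl y), if_neg (lt_irrefl y),
            scanGE, if_neg hex, if_neg (not_lt_of_gt hx), scanGE, if_pos rfl]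
          exact ⟨rfl, rfl⟩
        · rcases lt_or_gt_of_ne hey with hy | hy
          · -- y < candidate : insertion point 2
            right
            refine ⟨2, by simp, ?_, ?_⟩
            · rw [hstep, if_pos hx, hstep2, if_pos hy, fcwLoop]
              norm_num
            · rw [scanGE, if_neg hex, if_neg (not_lt_of_gt hx), scanGE,
                if_neg hey, if_neg (not_lt_of_gt hy), scanGE]
          · -- candidate < y : insertion point 1
            right
            refine ⟨1, by simp, ?_, ?_⟩
            · rw [hstep, if_pos hx, hstep2, if_neg (not_lt_of_gt hy), if_pos hy, fcwLoop]
              norm_num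
            · rw [scanGE, if_neg hex, if_neg (not_lt_of_gt hx), scanGE, if_neg hey, if_pos hy]
      · -- candidate < x : insertion point 0
        right
        refine ⟨0, by simp, ?_, ?_⟩
        · rw [hstep, if_neg (not_lt_of_gt hx), if_pos hx, fcwLoop]
          norm_num
        · rw [scanGE, if_neg hex, if_pos hx]
  | a :: b :: c :: rest => simp at hlen

-- candidate strictly above every word: A's loop walks to (len, len-1), B scans to the end
theorem fcwLoop_all_lt (ws : List String) (candidate : String)
    (h : ∀ (j : Nat) (hj : j < ws.length), ws[j] < candidate) :
    ∀ (N : Nat) (l r : Int), (r + 1 - l).toNat = N → 0 ≤ l → l ≤ r + 1 → r < (ws.length : Int) →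
    fcwLoop ws candidate l r = Sum.inr (r + 1, r) := by
  intro N
  induction N using Nat.strong_induction_on with
  | _ N ih =>
    intro l r hN h0 hlr hrlen
    by_cases hc : l ≤ r
    · have hb := PySem.Int.floordiv_two_mid_bounds hc
      set mid := PySem.Int.floordiv (l + r) 2 with hmid
      have hmidn : mid.toNat < ws.length := by omega
      have hget : PySem.List.pyGetD ws mid "" = ws[mid.toNat] := by
        rw [PySem.List.pyGetD_of_nonneg ws "" (by omega), List.getD_eq_getElem?_getD,
          List.getElem?_eq_getElem hmidn]
        rfl
      rw [fcwLoop]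
      simp only [dif_pos hc, ← hmid, hget]
      rw [if_pos (h mid.toNat hmidn)]
      exact ih (r + 1 - (mid + 1)).toNat (by omega) (mid + 1) r rfl (by omega) (by omega) hrlen
    · rw [fcwLoop]
      simp only [dif_neg hc]
      have : l = r + 1 := by omega
      rw [this]

-- candidate strictly below every word: A's loop walks to (0, -1), B stops at the first word
theorem fcwLoop_all_gt (ws : List String) (candidate : String)
    (h : ∀ (j : Nat) (hj : j < ws.length), candidate < ws[j]) :
    ∀ (N : Nat) (l r : Int), (r + 1 - l).toNat = N → 0 ≤ l → l ≤ r + 1 → r < (ws.length : Int) →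
    fcwLoop ws candidate l r = Sum.inr (l, l - 1) := by
  intro N
  induction N using Nat.strong_induction_on with
  | _ N ih =>
    intro l r hN h0 hlr hrlen
    by_cases hc : l ≤ r
    · have hb := PySem.Int.floordiv_two_mid_bounds hc
      set mid := PySem.Int.floordiv (l + r) 2 with hmid
      have hmidn : mid.toNat < ws.length := by omega
      have hget : PySem.List.pyGetD ws mid "" = ws[mid.toNat] := by
        rw [PySem.List.pyGetD_of_nonneg ws "" (by omega), List.getD_eq_getElem?_getD,
          List.getElem?_eq_getElem hmidn]
        rfl
      rw [fcwLoop]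
      simp only [dif_pos hc, ← hmid, hget]
      rw [if_neg (not_lt_of_gt (h mid.toNat hmidn)), if_pos (h mid.toNat hmidn)]
      exact ih (mid - 1 + 1 - l).toNat (by omega) l (mid - 1) rfl h0 (by omega) (by omega)
    · rw [fcwLoop]
      simp only [dif_neg hc]
      have : r = l - 1 := by omega
      rw [this]

theorem scanGE_all_lt (ws : List String) (candidate : String) (i : Nat)
    (h : ∀ w ∈ ws, w < candidate) :
    scanGE ws candidate i = Sum.inr (i + ws.length) := by
  induction ws generalizing i with
  | nil => simp [scanGE]
  | cons w rest ih =>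
    have hw := h w List.mem_cons_self
    rw [scanGE, if_neg (ne_of_lt hw), if_neg (not_lt_of_gt hw),
      ih (i + 1) (fun x hx => h x (List.mem_cons_of_mem _ hx))]
    simp only [Sum.inr.injEq, List.length_cons]
    omega

theorem scanGE_all_gt (ws : List String) (candidate : String) (i : Nat)
    (h : ∀ w ∈ ws, candidate < w) :
    scanGE ws candidate i = Sum.inr i := by
  cases ws with
  | nil => rfl
  | cons w rest =>
    have hw := h w List.mem_cons_self
    rw [scanGE, if_neg (ne_of_gt hw), if_pos hw]

theorem search_agree_all_lt (ws : List String) (candidate : String)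
    (h : ∀ w ∈ ws, w.toList < candidate.toList) : SearchAgree ws candidate := by
  right
  refine ⟨ws.length, le_refl _, ?_, ?_⟩
  · rw [fcwLoop_all_lt ws candidate
      (fun j hj => String.lt_iff_toList_lt.mpr (h ws[j] (List.getElem_mem hj)))
      ((ws.length : Int) - 1 + 1 - 0).toNat 0 ((ws.length : Int) - 1) rfl
      (by omega) (by omega) (by omega)]
    norm_num
  · rw [scanGE_all_lt ws candidate 0 (fun w hw => String.lt_iff_toList_lt.mpr (h w hw))]
    simp
theorem search_agree_all_gt (ws : List String) (candidate : String)
    (h : ∀ w ∈ ws, candidate.toList < w.toList) : SearchAgree ws candidate := by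
  right
  refine ⟨0, Nat.zero_le _, ?_, ?_⟩
  · rw [fcwLoop_all_gt ws candidate
      (fun j hj => String.lt_iff_toList_lt.mpr (h ws[j] (List.getElem_mem hj)))
      ((ws.length : Int) - 1 + 1 - 0).toNat 0 ((ws.length : Int) - 1) rfl
      (by omega) (by omega) (by omega)]
    norm_num
  · exact scanGE_all_gt ws candidate 0 (fun w hw => String.lt_iff_toList_lt.mpr (h w hw))

-- A's inline both-branch equals B's pickClosest on equal neighbours
theorem pick_cases (before after : Option String) (candidate boundary : String) :
    (if boundary = "before" then before
     else if boundary = "after" then after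
     else
       match before, after with
       | none, a => a
       | some b, none => some b
       | some b, some a =>
         if |ord0 b - ord0 candidate| < |ord0 a - ord0 candidate| then some b
         else if |ord0 a - ord0 candidate| < |ord0 b - ord0 candidate| then some a
         else if b < candidate then some b else some a)
      = pickClosest before after candidate boundary := by
  unfold pickClosest
  by_cases h1 : boundary = "before"
  · rw [if_pos h1, if_pos h1]
  by_cases h2 : boundary = "after"
  · rw [if_neg h1, if_neg h1, if_pos h2, if_pos h2]
  rw [if_neg h1, if_neg h1, if_neg h2, if_neg h2]
  match before, after with
  | none, a => rfl
  | some b, none => rfl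
  | some b, some a =>
    simp only
    rcases lt_trichotomy (|ord0 b - ord0 candidate|) (|ord0 a - ord0 candidate|) with h | h | h
    · rw [if_pos h, if_pos (ne_of_lt h), if_pos h]
    · rw [h]
      simp
    · have hn : ¬ |ord0 b - ord0 candidate| < |ord0 a - ord0 candidate| := not_lt_of_gt h
      rw [if_neg hn, if_pos h, if_pos (ne_of_gt h), if_neg hn]

-- ===== VERDICT (by name: the statement is the Claim_ definition above) =====
theorem find_closest_word_spec : Claim_equal_find_closest_word := by
  intro ws candidate boundary _hdom hpre
  rcases hpre with ⟨hb, hsor, _⟩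
  have hbne : ¬ (boundary ≠ "before" ∧ boundary ≠ "after" ∧ boundary ≠ "both") := by
    rcases hb with h | h | h <;> simp [h]
  have hagree : SearchAgree ws candidate := by
    rcases hsor with hs' | hlen | hall | hall
    · exact search_agree_sorted ws candidate
        (hs'.imp (fun h => String.le_iff_toList_le.mpr h))
    · exact search_agree_small ws candidate hlen
    · exact search_agree_all_lt ws candidate hall
    · exact search_agree_all_gt ws candidate hall
  unfold Spec_find_closest_word find_closest_word find_closest_word_alt
  rw [if_neg hbne, if_neg hbne]
  rcases hagree with ⟨h1, h2⟩ | ⟨i, hi, h1, h2⟩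
  · rw [h1, h2]
  · simp only [h1, h2]
    rw [← pick_cases _ _ candidate boundary, before_eq ws i hi, after_eq ws i hi]
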